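-- pv_equiv track=rewrite | github.com/31b4/Advent-of-code-2021 | day15/main.py | make25times
-- ===== SOURCE A (Python) =====
-- def make25times(matrix):
--     bigmatrix = matrix
--     for i in range(len(matrix)):#horizontalis
--         for j in range(len(matrix[i])*4):
--             if bigmatrix[i][j]+1 > 9:
--                 bigmatrix[i].append(1)
--             else:
--                 bigmatrix[i].append(bigmatrix[i][j]+1)
--     for i in range(len(bigmatrix)*4):#vertikalis
--         line = []
--         for j in range(len(matrix[i])):
--             if bigmatrix[i][j]+1 > 9:
--                 line.append(1)
--             else:
--                 line.append(bigmatrix[i][j]+1)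
--         bigmatrix.append(line)
--     return bigmatrix
-- ===== SOURCE B (Python) =====
-- def make25times(matrix):
--     # Direct tiled computation: each output cell comes from the original cell
--     # plus a tile offset, instead of A's neighbour-propagation.
--     # Mutates `matrix` in place (slice assignment) and returns it, like A.
--     def bump(x, k):
--         for _ in range(k):
--             x = x + 1 if x < 9 else 1
--         return x
--     n = len(matrix)
--     orig = [row[:] for row in matrix]
--     matrix[:] = [
--         [bump(x, r // n + tj) for tj in range(5) for x in orig[r % n]]
--         for r in range(5 * n)
--     ]
--     return matrix
-- ===== Notes on version B (the rewrite author's own statement) =====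
-- stated objective: alternative
-- what changed: Replaces A's neighbour-propagation (each new cell copied-and-bumped from an already computed cell) with a direct closed computation: every output cell is obtained from the original cell at (r%n, c%w) by applying the wrap-step r//n + c//w times, building the whole 5x5-tiled grid in one comprehension.
import Mathlib
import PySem

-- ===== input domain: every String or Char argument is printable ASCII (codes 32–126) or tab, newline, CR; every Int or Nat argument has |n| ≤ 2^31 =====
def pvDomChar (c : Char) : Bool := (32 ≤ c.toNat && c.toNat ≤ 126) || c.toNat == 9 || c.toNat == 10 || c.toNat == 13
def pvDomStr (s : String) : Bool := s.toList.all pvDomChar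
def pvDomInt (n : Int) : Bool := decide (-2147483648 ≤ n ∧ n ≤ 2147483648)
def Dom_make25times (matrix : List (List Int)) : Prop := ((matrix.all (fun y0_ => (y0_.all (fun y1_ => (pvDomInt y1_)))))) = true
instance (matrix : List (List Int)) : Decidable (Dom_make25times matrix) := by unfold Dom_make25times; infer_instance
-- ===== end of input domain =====

-- B computes every cell of the 5x5-tiled grid directly from the original cell plus a tile offset,
-- instead of A's neighbour-propagation; like A, B mutates `matrix` in place (equivalence is about the return value).

-- ===== PORT A =====
-- horizontal inner loop: for j in range(4*w): bigmatrix[i].append(step of bigmatrix[i][j])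
-- (the index j is always in range in the Python, so getD's default is never used)
def pvHLoop (acc : List Int) (j : Nat) : Nat → List Int
  | 0 => acc
  | fuel + 1 =>
      let x := acc.getD j 0
      pvHLoop (acc ++ [if x + 1 > 9 then 1 else x + 1]) (j + 1) fuel

-- vertical loop: for i in range(4*n): append [step of bigmatrix[i][j] for j in range(len(matrix[i]))]
def pvVLoop (acc : List (List Int)) (i : Nat) : Nat → List (List Int)
  | 0 => acc
  | fuel + 1 =>
      let row := acc.getD i []
      pvVLoop (acc ++ [row.map (fun x => if x + 1 > 9 then 1 else x + 1)]) (i + 1) fuel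

def make25times (matrix : List (List Int)) : List (List Int) :=
  let bigmatrix := matrix.map (fun row => pvHLoop row 0 (4 * row.length))
  pvVLoop bigmatrix 0 (4 * bigmatrix.length)

-- ===== PORT B =====
-- bump(x, k): apply the wrap-step k times
def pvBump (x : Int) : Nat → Int
  | 0 => x
  | k + 1 => pvBump (if x < 9 then x + 1 else 1) k

def make25times_alt (matrix : List (List Int)) : List (List Int) :=
  let n := matrix.length
  (List.range (5 * n)).map (fun r =>
    let src := matrix.getD (r % n) []
    (List.range 5).flatMap (fun tj => src.map (fun x => pvBump x (r / n + tj))))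

-- ===== PRECONDITION & SPEC =====
def Spec_make25times (matrix : List (List Int)) (out : List (List Int)) : Prop := out = make25times_alt matrix
instance (matrix : List (List Int)) (out : List (List Int)) : Decidable (Spec_make25times matrix out) := by unfold Spec_make25times; infer_instance

-- ===== CLAIM (what is proved, stated in full; the proofs are below) =====
def Claim_equal_make25times : Prop := ∀ (matrix : List (List Int)), Dom_make25times matrix → Spec_make25times matrix (make25times matrix)

-- ===== LEMMAS AND PROOFS =====

-- the wrap-step, as A writes it
def pvStep (x : Int) : Int := if x + 1 > 9 then 1 else x + 1

theorem pvBump_succ (x : Int) (k : Nat) : pvBump x (k + 1) = pvStep (pvBump x k) := by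
  induction k generalizing x with
  | zero =>
      show pvBump (if x < 9 then x + 1 else 1) 0 = pvStep (pvBump x 0)
      simp only [pvBump, pvStep]
      split_ifs <;> omega
  | succ k ih =>
      show pvBump (if x < 9 then x + 1 else 1) (k + 1) = _
      rw [ih]; rfl

-- one row at tile offset q
def pvTile (row : List Int) (q : Nat) : List Int := row.map (fun x => pvBump x q)

theorem pvTile_zero (row : List Int) : pvTile row 0 = row := by
  simp [pvTile, pvBump]

theorem pvTile_succ (row : List Int) (q : Nat) : (pvTile row q).map pvStep = pvTile row (q + 1) := by
  unfold pvTile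
  rw [List.map_map]
  apply List.map_congr_left
  intro x _
  exact (pvBump_succ x q).symm

theorem pvTile_length (row : List Int) (q : Nat) : (pvTile row q).length = row.length := by
  simp [pvTile]

-- the full 5-wide block of a row, starting at tile offset q
def pvBlock (row : List Int) (q : Nat) : List Int :=
  (List.range 5).flatMap (fun tj => row.map (fun x => pvBump x (q + tj)))

theorem pvBlock_eq (row : List Int) (q : Nat) :
    pvBlock row q = pvTile row q ++ (pvTile row (q+1) ++ (pvTile row (q+2) ++ (pvTile row (q+3) ++ pvTile row (q+4)))) := by
  have h5 : List.range 5 = [0, 1, 2, 3, 4] := rfl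
  simp [pvBlock, pvTile, h5]

theorem getD_append_cons {α : Type} (X : List α) (b : α) (R : List α) (d : α) :
    (X ++ b :: R).getD X.length d = b := by
  simp [List.getD]

theorem map_step_block (row : List Int) (q : Nat) :
    (pvBlock row q).map pvStep = pvBlock row (q + 1) := by
  simp only [pvBlock_eq, List.map_append, pvTile_succ]

-- ---- the two loops split and consume well-shaped chunks ----
theorem pvHLoop_add (acc : List Int) (j f1 f2 : Nat) :
    pvHLoop acc j (f1 + f2) = pvHLoop (pvHLoop acc j f1) (j + f1) f2 := by
  induction f1 generalizing acc j with
  | zero => simp [pvHLoop]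
  | succ f1 ih =>
      rw [show f1 + 1 + f2 = (f1 + f2) + 1 from by omega]
      show pvHLoop _ (j + 1) (f1 + f2) = pvHLoop (pvHLoop _ (j + 1) f1) (j + (f1 + 1)) f2
      rw [ih]; congr 1; omega

theorem pvHLoop_chunk (X B C : List Int) :
    pvHLoop (X ++ B ++ C) X.length B.length = (X ++ B ++ C) ++ B.map pvStep := by
  induction B generalizing X C with
  | nil => simp [pvHLoop]
  | cons b B ih =>
      show pvHLoop _ (X.length + 1) B.length = _
      have hx : (X ++ b :: B ++ C).getD X.length 0 = b := by
        rw [List.append_assoc]; exact getD_append_cons X b (B ++ C) 0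
      rw [hx]
      have harr : (X ++ b :: B ++ C) ++ [if b + 1 > 9 then 1 else b + 1]
          = (X ++ [b]) ++ B ++ (C ++ [pvStep b]) := by
        simp [pvStep, List.append_assoc]
      rw [harr]
      have hlen : X.length + 1 = (X ++ [b]).length := by simp
      rw [hlen, ih]
      simp [pvStep, List.append_assoc]

theorem pvHLoop_chunk' (X B C : List Int) (j f : Nat) (hj : j = X.length) (hf : f = B.length) :
    pvHLoop (X ++ B ++ C) j f = (X ++ B ++ C) ++ B.map pvStep := by
  subst hj hf; exact pvHLoop_chunk X B C

theorem pvVLoop_add (acc : List (List Int)) (j f1 f2 : Nat) :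
    pvVLoop acc j (f1 + f2) = pvVLoop (pvVLoop acc j f1) (j + f1) f2 := by
  induction f1 generalizing acc j with
  | zero => simp [pvVLoop]
  | succ f1 ih =>
      rw [show f1 + 1 + f2 = (f1 + f2) + 1 from by omega]
      show pvVLoop _ (j + 1) (f1 + f2) = pvVLoop (pvVLoop _ (j + 1) f1) (j + (f1 + 1)) f2
      rw [ih]; congr 1; omega

theorem pvVLoop_chunk (X B C : List (List Int)) :
    pvVLoop (X ++ B ++ C) X.length B.length = (X ++ B ++ C) ++ B.map (fun r => r.map pvStep) := by
  induction B generalizing X C with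
  | nil => simp [pvVLoop]
  | cons b B ih =>
      show pvVLoop _ (X.length + 1) B.length = _
      have hx : (X ++ b :: B ++ C).getD X.length [] = b := by
        rw [List.append_assoc]; exact getD_append_cons X b (B ++ C) []
      rw [hx]
      have harr : (X ++ b :: B ++ C) ++ [b.map (fun x => if x + 1 > 9 then 1 else x + 1)]
          = (X ++ [b]) ++ B ++ (C ++ [b.map pvStep]) := by
        simp [pvStep, List.append_assoc]
      rw [harr]
      have hlen : X.length + 1 = (X ++ [b]).length := by simp
      rw [hlen, ih]
      simp [List.append_assoc]

theorem pvVLoop_chunk' (X B C : List (List Int)) (j f : Nat) (hj : j = X.length) (hf : f = B.length) :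
    pvVLoop (X ++ B ++ C) j f = (X ++ B ++ C) ++ B.map (fun r => r.map pvStep) := by
  subst hj hf; exact pvVLoop_chunk X B C

theorem map_step_row (row : List Int) : row.map pvStep = pvTile row 1 := by
  rw [← pvTile_succ row 0, pvTile_zero]

-- horizontal phase of A on one row = B's 5-wide block at offset 0
theorem pvHLoop_full (row : List Int) :
    pvHLoop row 0 (4 * row.length) = pvBlock row 0 := by
  have lt := pvTile_length row
  rw [show 4 * row.length = row.length + (row.length + (row.length + row.length)) from by omega,
      pvHLoop_add, pvHLoop_add, pvHLoop_add]
  rw [show pvHLoop row 0 row.length = row ++ pvTile row 1 from by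
        have h := pvHLoop_chunk' [] row [] 0 row.length (by simp) rfl
        simp only [List.nil_append, List.append_nil, map_step_row] at h
        exact h]
  rw [show pvHLoop (row ++ pvTile row 1) (0 + row.length) row.length
        = row ++ pvTile row 1 ++ pvTile row 2 from by
        simpa [pvTile_succ] using pvHLoop_chunk' row (pvTile row 1) [] (0 + row.length) row.length
          (by omega) (by rw [lt])]
  rw [show pvHLoop (row ++ pvTile row 1 ++ pvTile row 2) (0 + row.length + row.length) row.length
        = row ++ pvTile row 1 ++ pvTile row 2 ++ pvTile row 3 from by
        simpa [pvTile_succ] using pvHLoop_chunk' (row ++ pvTile row 1) (pvTile row 2) []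
          (0 + row.length + row.length) row.length (by simp [lt]) (by rw [lt])]
  rw [show pvHLoop (row ++ pvTile row 1 ++ pvTile row 2 ++ pvTile row 3)
        (0 + row.length + row.length + row.length) row.length
        = row ++ pvTile row 1 ++ pvTile row 2 ++ pvTile row 3 ++ pvTile row 4 from by
        simpa [pvTile_succ] using pvHLoop_chunk' (row ++ pvTile row 1 ++ pvTile row 2) (pvTile row 3) []
          (0 + row.length + row.length + row.length) row.length (by simp [lt, Nat.add_assoc]) (by rw [lt])]
  rw [pvBlock_eq]
  simp [List.append_assoc, pvTile_zero]

-- elements of a map over `range` by getD = map over the list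
theorem range_map_getD {α β : Type} (l : List α) (d : α) (f : α → β) :
    (List.range l.length).map (fun i => f (l.getD i d)) = l.map f := by
  apply List.ext_getElem
  · simp
  · intro i h1 h2
    simp only [List.getElem_map, List.getElem_range]
    rw [List.getD_eq_getElem l d (by simpa using h1)]

-- pushing a step over a whole block-row of the matrix
theorem rt_succ (m : List (List Int)) (q : Nat) :
    (m.map (fun row => pvBlock row q)).map (fun r => r.map pvStep) = m.map (fun row => pvBlock row (q + 1)) := by
  rw [List.map_map]
  apply List.map_congr_left
  intro row _
  exact map_step_block row q

-- vertical phase of A = the four extra block-rows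
theorem pvVLoop_full (m : List (List Int)) :
    pvVLoop (m.map (fun row => pvBlock row 0)) 0 (4 * m.length) =
      m.map (fun row => pvBlock row 0) ++ m.map (fun row => pvBlock row 1) ++
      m.map (fun row => pvBlock row 2) ++ m.map (fun row => pvBlock row 3) ++
      m.map (fun row => pvBlock row 4) := by
  have lm : ∀ q : Nat, (m.map (fun row => pvBlock row q)).length = m.length := by
    intro q; simp
  rw [show 4 * m.length = m.length + (m.length + (m.length + m.length)) from by omega,
      pvVLoop_add, pvVLoop_add, pvVLoop_add]
  rw [show pvVLoop (m.map (fun row => pvBlock row 0)) 0 m.length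
        = m.map (fun row => pvBlock row 0) ++ m.map (fun row => pvBlock row 1) from by
        have h := pvVLoop_chunk' [] (m.map (fun row => pvBlock row 0)) [] 0 m.length (by simp) (by simp)
        simp only [List.nil_append, List.append_nil, rt_succ] at h
        exact h]
  rw [show pvVLoop (m.map (fun row => pvBlock row 0) ++ m.map (fun row => pvBlock row 1)) (0 + m.length) m.length
        = m.map (fun row => pvBlock row 0) ++ m.map (fun row => pvBlock row 1) ++ m.map (fun row => pvBlock row 2) from by
        have h := pvVLoop_chunk' (m.map (fun row => pvBlock row 0)) (m.map (fun row => pvBlock row 1)) []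
          (0 + m.length) m.length (by simp) (by simp)
        simp only [List.append_nil, rt_succ] at h
        exact h]
  rw [show pvVLoop (m.map (fun row => pvBlock row 0) ++ m.map (fun row => pvBlock row 1) ++ m.map (fun row => pvBlock row 2))
          (0 + m.length + m.length) m.length
        = m.map (fun row => pvBlock row 0) ++ m.map (fun row => pvBlock row 1) ++ m.map (fun row => pvBlock row 2) ++
          m.map (fun row => pvBlock row 3) from by
        have h := pvVLoop_chunk' (m.map (fun row => pvBlock row 0) ++ m.map (fun row => pvBlock row 1))
          (m.map (fun row => pvBlock row 2)) [] (0 + m.length + m.length) m.length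
          (by simp) (by simp)
        simp only [List.append_nil, rt_succ] at h
        exact h]
  rw [show pvVLoop (m.map (fun row => pvBlock row 0) ++ m.map (fun row => pvBlock row 1) ++ m.map (fun row => pvBlock row 2) ++
          m.map (fun row => pvBlock row 3)) (0 + m.length + m.length + m.length) m.length
        = m.map (fun row => pvBlock row 0) ++ m.map (fun row => pvBlock row 1) ++ m.map (fun row => pvBlock row 2) ++
          m.map (fun row => pvBlock row 3) ++ m.map (fun row => pvBlock row 4) from by
        have h := pvVLoop_chunk'
          (m.map (fun row => pvBlock row 0) ++ m.map (fun row => pvBlock row 1) ++ m.map (fun row => pvBlock row 2))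
          (m.map (fun row => pvBlock row 3)) [] (0 + m.length + m.length + m.length) m.length
          (by simp [Nat.add_assoc]) (by simp)
        simp only [List.append_nil, rt_succ] at h
        exact h]

-- range (k*n) as k shifted copies of range n
theorem range_mul_flat (k n : Nat) :
    List.range (k * n) = (List.range k).flatMap (fun q => (List.range n).map (fun s => n * q + s)) := by
  induction k with
  | zero => simp
  | succ k ih =>
      rw [show (k + 1) * n = k * n + n from by ring, List.range_add, ih, List.range_succ]
      simp [List.flatMap_append, Nat.mul_comm]

-- mod/div on one block of indices
theorem block_eq (m : List (List Int)) (q : Nat) (hn : 0 < m.length) :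
    (List.range m.length).map
        (fun s => pvBlock (m.getD ((m.length * q + s) % m.length) []) ((m.length * q + s) / m.length))
      = m.map (fun row => pvBlock row q) := by
  rw [← range_map_getD m [] (fun row => pvBlock row q)]
  apply List.map_congr_left
  intro s hs
  have hs' : s < m.length := List.mem_range.mp hs
  have h1 : (m.length * q + s) % m.length = s := by
    rw [Nat.mul_add_mod]; exact Nat.mod_eq_of_lt hs'
  have h2 : (m.length * q + s) / m.length = q := by
    rw [Nat.mul_add_div hn]; simp [Nat.div_eq_of_lt hs']
  rw [h1, h2]

-- B's result as the same five block-rows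
theorem alt_eq (m : List (List Int)) (hn : 0 < m.length) :
    make25times_alt m = m.map (fun row => pvBlock row 0) ++ m.map (fun row => pvBlock row 1) ++
      m.map (fun row => pvBlock row 2) ++ m.map (fun row => pvBlock row 3) ++
      m.map (fun row => pvBlock row 4) := by
  have halt : make25times_alt m
      = (List.range (5 * m.length)).map (fun r => pvBlock (m.getD (r % m.length) []) (r / m.length)) := rfl
  rw [halt, range_mul_flat 5 m.length, List.map_flatMap]
  have hb : ∀ q ∈ List.range 5,
      ((List.range m.length).map (fun s => m.length * q + s)).map
          (fun r => pvBlock (m.getD (r % m.length) []) (r / m.length))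
        = m.map (fun row => pvBlock row q) := by
    intro q _
    rw [List.map_map]
    exact block_eq m q hn
  rw [List.flatMap_congr hb]
  have h5 : List.range 5 = [0, 1, 2, 3, 4] := rfl
  simp [h5, List.append_assoc]

-- ===== VERDICT (by name: the statement is the Claim_ definition above) =====
theorem make25times_spec : Claim_equal_make25times := by
  intro matrix _
  show make25times matrix = make25times_alt matrix
  by_cases hm : matrix = []
  · subst hm; rfl
  · have hn : 0 < matrix.length := List.length_pos_of_ne_nil hm
    have hA : make25times matrix
        = pvVLoop (matrix.map (fun row => pvHLoop row 0 (4 * row.length))) 0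
            (4 * (matrix.map (fun row => pvHLoop row 0 (4 * row.length))).length) := rfl
    rw [hA, List.map_congr_left (fun row (_ : row ∈ matrix) => pvHLoop_full row), List.length_map,
        pvVLoop_full, alt_eq matrix hn]
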